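-- pv_equiv track=rewrite | github.com/NeilVibe/LocalizationTools | tests/fixtures/mock_gamedata/stringtable/loc/generate_multilingual.py | _generic_translate
-- ===== SOURCE A (Python) =====
-- def _generic_translate(kor: str, lang: str, idx: int) -> str:
--     """Fallback generic translation preserving br-tags."""
--     has_br = "<br/>" in kor
--     if lang == "jpn":
--         if has_br:
--             parts = kor.split("<br/>")
--             translated = [p + "（翻訳済み）" if p.strip() else p for p in parts]
--             return "<br/>".join(translated)
--         return kor + "（日本語翻訳）" if kor else ""
--     elif lang == "deu":
--         if has_br:
--             parts = kor.split("<br/>")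
--             translated = [p + " (übersetzt)" if p.strip() else p for p in parts]
--             return "<br/>".join(translated)
--         return kor + " (Deutsch)" if kor else ""
--     else:
--         if has_br:
--             parts = kor.split("<br/>")
--             translated = [p + " (traducido)" if p.strip() else p for p in parts]
--             return "<br/>".join(translated)
--         return kor + " (Español)" if kor else ""
-- ===== SOURCE B (Python) =====
-- def _tag_segments(s: str, part: str) -> str:
--     """Incrementally scan for '<br/>' with find, suffixing each non-blank segment."""
--     i = s.find("<br/>")
--     if i < 0:
--         return s + part if s.strip() else s
--     head = s[:i]
--     head = head + part if head.strip() else head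
--     return head + "<br/>" + _tag_segments(s[i + 5:], part)
--
-- def _generic_translate(kor: str, lang: str, idx: int) -> str:
--     """Single recursive pass over the string (find + slice), no split/join staging."""
--     part, whole = {
--         "jpn": ("（翻訳済み）", "（日本語翻訳）"),
--         "deu": (" (übersetzt)", " (Deutsch)"),
--     }.get(lang, (" (traducido)", " (Español)"))
--     if kor.find("<br/>") < 0:
--         return kor + whole if kor else ""
--     return _tag_segments(kor, part)
-- ===== Notes on version B (the rewrite author's own statement) =====
-- stated objective: alternative
-- what changed: A runs three duplicated branches, each doing staged split('<br/>') / list-comprehension / join passes; B looks the two suffixes up in a table (Espanol default) and then makes a single recursive pass over the string with str.find and slicing, emitting each suffixed segment and '<br/>' as it goes, never materializing the parts list.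
import Mathlib
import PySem

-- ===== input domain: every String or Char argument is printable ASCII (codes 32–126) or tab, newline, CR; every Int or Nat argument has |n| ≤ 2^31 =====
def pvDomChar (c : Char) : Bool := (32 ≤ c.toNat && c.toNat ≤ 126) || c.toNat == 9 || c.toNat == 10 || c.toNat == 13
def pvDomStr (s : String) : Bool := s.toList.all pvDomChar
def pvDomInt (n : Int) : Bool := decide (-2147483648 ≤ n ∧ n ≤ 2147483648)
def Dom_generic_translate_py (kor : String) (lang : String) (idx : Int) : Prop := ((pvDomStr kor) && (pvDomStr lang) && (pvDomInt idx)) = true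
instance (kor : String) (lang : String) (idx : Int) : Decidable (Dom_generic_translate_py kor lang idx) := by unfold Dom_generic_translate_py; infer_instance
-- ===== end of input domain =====

-- B replaces A's staged split/map/join passes (duplicated over three language branches) by one
-- table-parameterized recursive find-and-slice scan that suffixes each segment as it goes (alternative decomposition).

-- ===== PORT A =====
def generic_translate_py (kor : String) (lang : String) (idx : Int) : String :=
  let has_br := PySem.Str.isIn "<br/>" kor
  if lang == "jpn" then
    if has_br then
      let parts := (PySem.Str.split? kor "<br/>").getD []
      let translated := parts.map (fun p => if PySem.Str.strip p ≠ "" then p ++ "（翻訳済み）" else p)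
      PySem.Str.join "<br/>" translated
    else if kor ≠ "" then kor ++ "（日本語翻訳）" else ""
  else if lang == "deu" then
    if has_br then
      let parts := (PySem.Str.split? kor "<br/>").getD []
      let translated := parts.map (fun p => if PySem.Str.strip p ≠ "" then p ++ " (übersetzt)" else p)
      PySem.Str.join "<br/>" translated
    else if kor ≠ "" then kor ++ " (Deutsch)" else ""
  else
    if has_br then
      let parts := (PySem.Str.split? kor "<br/>").getD []
      let translated := parts.map (fun p => if PySem.Str.strip p ≠ "" then p ++ " (traducido)" else p)
      PySem.Str.join "<br/>" translated
    else if kor ≠ "" then kor ++ " (Español)" else ""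

-- ===== PORT B =====
-- Source B's _tag_segments: one recursive pass with str.find and slicing
def pvTagSegments (s : String) (part : String) : String :=
  if h : PySem.Str.find s "<br/>" < 0 then
    if PySem.Str.strip s ≠ "" then s ++ part else s
  else
    let head := PySem.Str.slice s none (some (PySem.Str.find s "<br/>"))
    let head' := if PySem.Str.strip head ≠ "" then head ++ part else head
    head' ++ "<br/>" ++ pvTagSegments (PySem.Str.slice s (some (PySem.Str.find s "<br/>" + 5)) none) part
termination_by s.toList.length
decreasing_by
  have hi : 0 ≤ PySem.Chars.find s.toList ("<br/>".toList) := by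
    simpa using (not_lt.mp h)
  have hinf := (PySem.Chars.find_nonneg_iff s.toList ("<br/>".toList)).mp hi
  have hlen : 5 ≤ s.toList.length := by simpa using hinf.length_le
  simp only [PySem.Str.toList_slice, PySem.Str.find_eq, PySem.Chars.slice]
  rw [PySem.List.slice_from _ (by omega)]
  have := PySem.Chars.find_le_length s.toList ("<br/>".toList)
  simp only [List.length_drop]
  omega

def generic_translate_py_alt (kor : String) (lang : String) (idx : Int) : String :=
  let table : PySem.Dict String (String × String) :=
    ((PySem.Dict.empty).insert "jpn" ("（翻訳済み）", "（日本語翻訳）")).insert "deu" (" (übersetzt)", " (Deutsch)")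
  let pw := table.getD lang (" (traducido)", " (Español)")
  if PySem.Str.find kor "<br/>" < 0 then
    if kor ≠ "" then kor ++ pw.2 else ""
  else
    pvTagSegments kor pw.1

-- ===== PRECONDITION & SPEC =====
def Spec_generic_translate_py (kor : String) (lang : String) (idx : Int) (out : String) : Prop := out = generic_translate_py_alt kor lang idx
instance (kor : String) (lang : String) (idx : Int) (out : String) : Decidable (Spec_generic_translate_py kor lang idx out) := by unfold Spec_generic_translate_py; infer_instance

-- ===== CLAIM (what is proved, stated in full; the proofs are below) =====
def Claim_equal_generic_translate_py : Prop := ∀ (kor : String) (lang : String) (idx : Int), Dom_generic_translate_py kor lang idx → Spec_generic_translate_py kor lang idx (generic_translate_py kor lang idx)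

-- ===== LEMMAS AND PROOFS =====

def pvBrL : List Char := ['<', 'b', 'r', '/', '>']

-- clean structural form of splitting on "<br/>"
def pvSplitBr : List Char → List (List Char)
  | [] => [[]]
  | c :: rest =>
    if pvBrL.isPrefixOf (c :: rest) then [] :: pvSplitBr (rest.drop 4)
    else (pvSplitBr rest).modifyHead (c :: ·)
termination_by l => l.length
decreasing_by
  · simp only [List.length_cons, List.length_drop]; omega
  · simp

theorem pvModifyHead_id {α : Type} (l : List α) : List.modifyHead (fun x => x) l = l := by
  cases l <;> simp

theorem pvSplitBr_cons (c : Char) (rest : List Char) :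
    pvSplitBr (c :: rest)
      = if pvBrL.isPrefixOf (c :: rest) then [] :: pvSplitBr (rest.drop 4)
        else (pvSplitBr rest).modifyHead (c :: ·) := by
  rw [pvSplitBr]

theorem pvSplitBr_ne_nil (l : List Char) : pvSplitBr l ≠ [] := by
  induction l using pvSplitBr.induct with
  | case1 => simp [pvSplitBr]
  | case2 c rest h ih => simp [pvSplitBr_cons, h]
  | case3 c rest h ih =>
    simp only [pvSplitBr_cons, if_neg h]
    intro hc
    exact ih (by simpa using congrArg List.length hc)

theorem pvSplitOn_go_spec : ∀ (fuel : ℕ) (l cur : List Char) (acc : List (List Char)),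
    l.length < fuel →
    PySem.Chars.splitOn.go pvBrL fuel l cur acc
      = acc.reverse ++ (pvSplitBr l).modifyHead (cur.reverse ++ ·) := by
  intro fuel
  induction fuel with
  | zero => intro l cur acc h; omega
  | succ fuel ih =>
    intro l cur acc h
    cases l with
    | nil => simp [PySem.Chars.splitOn.go, pvSplitBr]
    | cons c rest =>
      by_cases hp : pvBrL.isPrefixOf (c :: rest)
      · rw [show PySem.Chars.splitOn.go pvBrL (fuel+1) (c :: rest) cur acc
            = PySem.Chars.splitOn.go pvBrL fuel (List.drop pvBrL.length (c :: rest)) [] (cur.reverse :: acc) by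
          simp [PySem.Chars.splitOn.go, hp]]
        rw [ih _ _ _ (by simp only [List.length_drop, List.length_cons] at h ⊢; simp [pvBrL]; omega)]
        rw [pvSplitBr_cons, if_pos hp]
        simp [pvBrL, pvModifyHead_id]
      · rw [show PySem.Chars.splitOn.go pvBrL (fuel+1) (c :: rest) cur acc
            = PySem.Chars.splitOn.go pvBrL fuel rest (c :: cur) acc by
          simp [PySem.Chars.splitOn.go, hp]]
        rw [ih _ _ _ (by simp at h ⊢; omega)]
        rw [pvSplitBr_cons, if_neg hp, List.modifyHead_modifyHead]
        cases pvSplitBr rest <;> simp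

theorem pvSplitOn_eq (l : List Char) : PySem.Chars.splitOn l pvBrL = pvSplitBr l := by
  unfold PySem.Chars.splitOn
  rw [pvSplitOn_go_spec (l.length + 1) l [] [] (by omega)]
  simpa using pvModifyHead_id (pvSplitBr l)

-- find facts specialised to pvBrL
theorem pvFind_go_neg_one_le : ∀ (l : List Char) (k : ℕ), -1 ≤ PySem.Chars.find.go pvBrL l k := by
  intro l
  induction l with
  | nil => intro k; simp [PySem.Chars.find.go, show pvBrL.isEmpty = false from rfl]
  | cons c rest ih =>
    intro k
    by_cases h : pvBrL.isPrefixOf (c :: rest)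
    · simp [PySem.Chars.find.go, h]
    · simpa [PySem.Chars.find.go, h] using ih (k + 1)

theorem pvFind_go_shift : ∀ (l : List Char) (k : ℕ),
    PySem.Chars.find.go pvBrL l k
      = if PySem.Chars.find.go pvBrL l 0 = -1 then -1 else PySem.Chars.find.go pvBrL l 0 + k := by
  intro l
  induction l with
  | nil => intro k; simp [PySem.Chars.find.go, pvBrL]
  | cons c rest ih =>
    intro k
    by_cases h : pvBrL.isPrefixOf (c :: rest)
    · simp [PySem.Chars.find.go, h]
    · have h1 := ih (k + 1)
      have h0 := ih 1
      have hle := pvFind_go_neg_one_le rest 0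
      simp only [PySem.Chars.find.go, if_neg h] at *
      rw [h1, h0]
      push_cast
      split_ifs <;> omega

theorem pvFind_nil : PySem.Chars.find ([] : List Char) pvBrL = -1 := by
  simp [PySem.Chars.find, PySem.Chars.find.go, pvBrL]

theorem pvFind_cons_prefix (c : Char) (rest : List Char) (h : pvBrL.isPrefixOf (c :: rest)) :
    PySem.Chars.find (c :: rest) pvBrL = 0 := by
  simp [PySem.Chars.find, PySem.Chars.find.go, h]

theorem pvFind_cons_not_prefix (c : Char) (rest : List Char) (h : ¬ pvBrL.isPrefixOf (c :: rest)) :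
    PySem.Chars.find (c :: rest) pvBrL
      = if PySem.Chars.find rest pvBrL = -1 then -1 else PySem.Chars.find rest pvBrL + 1 := by
  show PySem.Chars.find.go pvBrL (c :: rest) 0 = _
  simp only [PySem.Chars.find.go, if_neg h]
  rw [pvFind_go_shift rest 1]
  rfl

theorem pvSplitBr_of_find_neg (l : List Char) (h : PySem.Chars.find l pvBrL = -1) :
    pvSplitBr l = [l] := by
  induction l using pvSplitBr.induct with
  | case1 => simp [pvSplitBr]
  | case2 c rest hp ih =>
    rw [pvFind_cons_prefix c rest hp] at h; omega
  | case3 c rest hp ih =>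
    rw [pvFind_cons_not_prefix c rest hp] at h
    by_cases hz : PySem.Chars.find rest pvBrL = -1
    · rw [pvSplitBr_cons, if_neg hp, ih hz]
      simp
    · simp [hz] at h
      have := pvFind_go_neg_one_le rest 0
      exact absurd h (by show ¬ (PySem.Chars.find.go pvBrL rest 0 + 1 = -1); omega)

theorem pvSplitBr_of_find_nonneg (l : List Char) (h : 0 ≤ PySem.Chars.find l pvBrL) :
    pvSplitBr l
      = l.take (PySem.Chars.find l pvBrL).toNat
        :: pvSplitBr (l.drop ((PySem.Chars.find l pvBrL).toNat + 5)) := by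
  induction l using pvSplitBr.induct with
  | case1 => rw [pvFind_nil] at h; omega
  | case2 c rest hp ih =>
    rw [pvFind_cons_prefix c rest hp]
    rw [pvSplitBr_cons, if_pos hp]
    simp
  | case3 c rest hp ih =>
    rw [pvFind_cons_not_prefix c rest hp] at h ⊢
    by_cases hz : PySem.Chars.find rest pvBrL = -1
    · simp [hz] at h
    · have hge : 0 ≤ PySem.Chars.find rest pvBrL := by
        have := pvFind_go_neg_one_le rest 0
        show 0 ≤ PySem.Chars.find.go pvBrL rest 0
        by_cases hq : PySem.Chars.find.go pvBrL rest 0 = -1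
        · exact absurd hq hz
        · omega
      simp only [if_neg hz]
      rw [pvSplitBr_cons, if_neg hp, ih hge]
      have ht : (PySem.Chars.find rest pvBrL + 1).toNat = (PySem.Chars.find rest pvBrL).toNat + 1 := by omega
      simp [ht]

-- Str-level join facts derived from the Chars lemmas
theorem pvStrJoin_singleton (sep x : String) : PySem.Str.join sep [x] = x := by
  apply String.toList_inj.mp
  simp [PySem.Str.toList_join, PySem.Chars.join_singleton]

theorem pvStrJoin_cons (sep x : String) (ys : List String) (h : ys ≠ []) :
    PySem.Str.join sep (x :: ys) = x ++ sep ++ PySem.Str.join sep ys := by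
  obtain ⟨y, t, rfl⟩ := List.exists_cons_of_ne_nil h
  apply String.toList_inj.mp
  simp [PySem.Str.toList_join, PySem.Chars.join_cons_cons, String.toList_append]

theorem pvSplitGetD (s : String) :
    (PySem.Str.split? s "<br/>").getD [] = (pvSplitBr s.toList).map String.ofList := by
  have he : pvBrL.isEmpty = false := by decide
  show (Option.map (fun x => List.map String.ofList x) (PySem.Chars.split? s.toList ("<br/>").toList)).getD [] = _
  rw [show ("<br/>" : String).toList = pvBrL from rfl]
  rw [PySem.Chars.split?, he]
  simp [pvSplitOn_eq]

theorem pvFindStr (s : String) : PySem.Str.find s "<br/>" = PySem.Chars.find s.toList pvBrL := by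
  rw [PySem.Str.find_eq]; rfl

-- A's split/map/join on a br-free string equals the whole-segment suffixing
theorem pvCoreNeg (part s : String) (h : PySem.Chars.find s.toList pvBrL = -1) :
    PySem.Str.join "<br/>"
        (((PySem.Str.split? s "<br/>").getD []).map
          (fun p => if PySem.Str.strip p ≠ "" then p ++ part else p))
      = pvTagSegments s part := by
  rw [pvSplitGetD, pvSplitBr_of_find_neg _ h]
  rw [pvTagSegments, dif_pos (by rw [pvFindStr, h]; omega)]
  simp only [List.map_cons, List.map_nil]
  rw [pvStrJoin_singleton]
  rw [String.ofList_toList]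

-- the core lemma: A's split/map/join equals B's recursive scan, for any suffix `part`
theorem pvCore (part : String) : ∀ (n : ℕ) (s : String), s.toList.length ≤ n →
    PySem.Str.join "<br/>"
        (((PySem.Str.split? s "<br/>").getD []).map
          (fun p => if PySem.Str.strip p ≠ "" then p ++ part else p))
      = pvTagSegments s part := by
  intro n
  induction n with
  | zero =>
    intro s hs
    apply pvCoreNeg
    have hnil : s.toList = [] := by
      cases hl : s.toList with
      | nil => rfl
      | cons c t => rw [hl] at hs; simp at hs
    rw [hnil, pvFind_nil]
  | succ n ih =>
    intro s hs
    by_cases hneg : PySem.Chars.find s.toList pvBrL = -1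
    · exact pvCoreNeg part s hneg
    · have hge : 0 ≤ PySem.Chars.find s.toList pvBrL := by
        have := PySem.Chars.neg_one_le_find s.toList pvBrL
        omega
      have hinf := (PySem.Chars.find_nonneg_iff s.toList pvBrL).mp hge
      have hlen5 : 5 ≤ s.toList.length := by simpa using hinf.length_le
      have hle := PySem.Chars.find_le_length s.toList pvBrL
      set i : ℕ := (PySem.Chars.find s.toList pvBrL).toNat with hi
      -- the remainder after the first "<br/>"
      set s' : String := String.ofList (s.toList.drop (i + 5)) with hs'
      have hts' : s'.toList = s.toList.drop (i + 5) := String.toList_ofList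
      have hhead : PySem.Str.slice s none (some (PySem.Str.find s "<br/>"))
          = String.ofList (s.toList.take i) := by
        apply String.toList_inj.mp
        rw [PySem.Str.toList_slice, String.toList_ofList, pvFindStr]
        exact PySem.List.slice_to _ hge
      have htail : PySem.Str.slice s (some (PySem.Str.find s "<br/>" + 5)) none = s' := by
        apply String.toList_inj.mp
        rw [PySem.Str.toList_slice, hts', pvFindStr]
        have h2 := PySem.List.slice_from (a := PySem.Chars.find s.toList pvBrL + 5) s.toList (by omega)
        exact h2.trans (by congr 1; omega)
      rw [pvSplitGetD, pvSplitBr_of_find_nonneg _ hge, ← hi]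
      rw [List.map_cons, List.map_cons]
      rw [pvStrJoin_cons _ _ _ (by
        simp only [ne_eq, List.map_eq_nil_iff]
        exact pvSplitBr_ne_nil _)]
      rw [pvTagSegments, dif_neg (by rw [pvFindStr]; omega)]
      simp only
      rw [hhead, htail]
      congr 1
      have hrec := ih s' (by rw [hts']; simp only [List.length_drop]; omega)
      rw [pvSplitGetD s', hts'] at hrec
      exact hrec

theorem pvBranch (part whole kor : String) :
    (if PySem.Str.isIn "<br/>" kor then
        PySem.Str.join "<br/>"
          (((PySem.Str.split? kor "<br/>").getD []).map
            (fun p => if PySem.Str.strip p ≠ "" then p ++ part else p))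
      else if kor ≠ "" then kor ++ whole else "")
    = (if PySem.Str.find kor "<br/>" < 0 then (if kor ≠ "" then kor ++ whole else "")
       else pvTagSegments kor part) := by
  by_cases h : PySem.Str.find kor "<br/>" < 0
  · have hni : PySem.Str.isIn "<br/>" kor = false := by
      rw [PySem.Str.isIn_eq, PySem.Chars.isIn_eq_false_iff]
      intro hinf
      have := (PySem.Chars.find_nonneg_iff kor.toList ("<br/>".toList)).mpr hinf
      rw [PySem.Str.find_eq] at h; omega
    rw [hni, if_pos h]
    simp
  · have hin : PySem.Str.isIn "<br/>" kor = true := by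
      rw [PySem.Str.isIn_eq, PySem.Chars.isIn_iff_infix, ← PySem.Chars.find_nonneg_iff]
      rw [PySem.Str.find_eq] at h; omega
    rw [hin, if_neg h]
    simp only [if_true]
    exact pvCore part kor.toList.length kor le_rfl

theorem pvTable_getD_other (lang : String) (h1 : lang ≠ "jpn") (h2 : lang ≠ "deu") :
    (((PySem.Dict.empty : PySem.Dict String (String × String)).insert "jpn" ("（翻訳済み）", "（日本語翻訳）")).insert
        "deu" (" (übersetzt)", " (Deutsch)")).getD lang (" (traducido)", " (Español)")
      = (" (traducido)", " (Español)") := by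
  have e1 : ("jpn" == lang) = false := by simp [Ne.symm h1]
  have e2 : ("deu" == lang) = false := by simp [Ne.symm h2]
  simp [PySem.Dict.getD, PySem.Dict.get?, PySem.Dict.insert, PySem.Dict.empty, List.find?, e1, e2]

-- ===== VERDICT (by name: the statement is the Claim_ definition above) =====
theorem generic_translate_py_spec : Claim_equal_generic_translate_py := by
  intro kor lang idx _
  unfold Spec_generic_translate_py generic_translate_py generic_translate_py_alt
  by_cases h1 : lang = "jpn"
  · subst h1
    simpa using pvBranch "（翻訳済み）" "（日本語翻訳）" kor
  · by_cases h2 : lang = "deu"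
    · subst h2
      simpa [h1] using pvBranch " (übersetzt)" " (Deutsch)" kor
    · simp only [show (lang == "jpn") = false by simp [h1], show (lang == "deu") = false by simp [h2],
        if_false, Bool.false_eq_true]
      rw [pvTable_getD_other lang h1 h2]
      exact pvBranch " (traducido)" " (Español)" kor
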